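-- pv_equiv track=rewrite | github.com/JIH0LEE/Coding-Test | Jiho/동적 프로그래밍/withN.py | solution
-- ===== SOURCE A (Python) =====
-- def solution(N, number):
--     dp=[set() for _ in range(9)]
--     dp[1]={N}
--     answer = -1
--     if N==number:
--         answer=1
--     else:
--         tmp=N
--
--         for i in range(2,9):
--             tmp=tmp*10+N
--             dp[i].add(tmp)
--             for j in range(1,i):
--                 a=dp[j]
--                 b=dp[i-j]
--                 for elem in a:
--                     for elem1 in b:
--                         dp[i].add(elem+elem1)
--                         dp[i].add(elem*elem1)
--                         dp[i].add(elem-elem1)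
--                         dp[i].add(elem//elem1)
--                         dp[i].add(elem1//elem)
--             dp[i]=dp[i]-{0}
--             if number in dp[i]:
--                 answer=i
--                 break
--
--
--     return answer
-- ===== SOURCE B (Python) =====
-- def solution(N, number):
--     if N == number:
--         return 1
--     memo = {}
--
--     def repunit(c):
--         return N if c == 1 else repunit(c - 1) * 10 + N
--
--     def reach(c):
--         if c == 1:
--             return {N}
--         if c in memo:
--             return memo[c]
--         vals = {repunit(c)}
--         for j in range(1, c):
--             for a in reach(j):
--                 for b in reach(c - j):
--                     vals.update((a + b, a * b, a - b, a // b, b // a))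
--         vals.discard(0)
--         memo[c] = vals
--         return vals
--
--     for count in range(2, 9):
--         if number in reach(count):
--             return count
--     return -1
-- ===== Notes on version B (the rewrite author's own statement) =====
-- stated objective: alternative
-- what changed: Bottom-up dp-array loop with break/answer state replaced by top-down memoized recursion: reach(c) computes the set for exactly c N's (with a recursive repunit helper) and the driver returns the first count in 2..8 whose set contains number.
import Mathlib
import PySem

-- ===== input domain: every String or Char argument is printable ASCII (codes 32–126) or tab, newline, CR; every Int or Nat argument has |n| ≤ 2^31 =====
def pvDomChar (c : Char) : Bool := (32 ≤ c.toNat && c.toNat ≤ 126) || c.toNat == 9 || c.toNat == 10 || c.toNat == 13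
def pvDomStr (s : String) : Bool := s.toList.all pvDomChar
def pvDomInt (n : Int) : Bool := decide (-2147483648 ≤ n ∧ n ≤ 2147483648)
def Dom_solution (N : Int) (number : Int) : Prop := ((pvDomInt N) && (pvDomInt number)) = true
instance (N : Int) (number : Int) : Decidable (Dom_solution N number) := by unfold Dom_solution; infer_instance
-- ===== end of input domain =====

-- B replaces A's bottom-up dp-array loop by top-down memoized recursion (reach/repunit helpers,
-- early returns); objective: alternative decomposition, same values. (Sets are consumed
-- order-insensitively in both Pythons, so the ports' insertion-order sets are faithful.)

-- ===== PORT A =====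
-- the five 'dp[i].add(…)' lines of A's innermost loop (identical text in B's 'vals.update((…))')
def pvOps (s : PySem.Set Int) (x y : Int) : PySem.Set Int :=
  ((((s.add (x + y)).add (x * y)).add (x - y)).add (PySem.Int.floordiv x y)).add
    (PySem.Int.floordiv y x)

-- 'for elem in a: for elem1 in b: <five adds>' (both Pythons contain this double loop verbatim)
def pvInner (s : PySem.Set Int) (a b : PySem.Set Int) : PySem.Set Int :=
  a.foldl (fun s x => b.foldl (fun s y => pvOps s x y) s) s

-- 'for i in range(2,9): … break' with state dp, tmp, recursion on the remaining range
def solutionLoop (N : Int) (number : Int) : Nat → List (PySem.Set Int) → Int → Int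
  | i, dp, tmp =>
    if h : 9 ≤ i then -1
    else
      let tmp' := tmp * 10 + N
      let s0 : PySem.Set Int := PySem.Set.add PySem.Set.empty tmp'
      let s1 := (List.range' 1 (i - 1)).foldl
        (fun s j => pvInner s (dp.getD j PySem.Set.empty) (dp.getD (i - j) PySem.Set.empty)) s0
      let s2 := PySem.Set.diff s1 (PySem.Set.add PySem.Set.empty 0)   -- dp[i] - {0}
      if PySem.Set.contains s2 number then (i : Int)
      else solutionLoop N number (i + 1) (dp.set i s2) tmp'
  termination_by i => 9 - i

def solution (N : Int) (number : Int) : Int :=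
  if N == number then 1
  else solutionLoop N number 2
    ((List.replicate 9 (PySem.Set.empty : PySem.Set Int)).set 1
      (PySem.Set.ofList [N])) N

-- ===== PORT B =====
-- helper repunit(c): N if c == 1 else repunit(c-1)*10 + N
def repunitB (N : Int) : Nat → Int
  | 0 => N
  | 1 => N
  | c + 2 => repunitB N (c + 1) * 10 + N

-- helper reach(c): the set of values buildable from exactly c copies of N (memoization in the
-- Python is an evaluation cache only; the recursion structure is transcribed)
def reachB (N : Int) : Nat → PySem.Set Int
  | 0 => PySem.Set.empty
  | 1 => PySem.Set.ofList [N]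
  | c + 2 =>
    let vals : PySem.Set Int := PySem.Set.add PySem.Set.empty (repunitB N (c + 2))
    let vals := (List.range' 1 (c + 1)).attach.foldl
      (fun s j => pvInner s (reachB N j.1) (reachB N (c + 2 - j.1))) vals
    PySem.Set.diff vals (PySem.Set.add PySem.Set.empty 0)   -- vals.discard(0)
  termination_by c => c
  decreasing_by
  · have := List.mem_range'.mp j.2; omega
  · have := List.mem_range'.mp j.2; omega

-- 'for count in range(2,9): if number in reach(count): return count' / 'return -1'
def firstCountB (N : Int) (number : Int) : Nat → Int
  | c =>
    if h : 9 ≤ c then -1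
    else if PySem.Set.contains (reachB N c) number then (c : Int)
    else firstCountB N number (c + 1)
  termination_by c => 9 - c

def solution_alt (N : Int) (number : Int) : Int :=
  if N == number then 1
  else firstCountB N number 2

-- ===== PRECONDITION & SPEC =====
-- Pre_ excludes N = 0 with number ≠ 0, on which both Pythons raise ZeroDivisionError (0 // 0).
def Pre_solution (N : Int) (number : Int) : Prop := N ≠ 0 ∨ number = 0
instance (N : Int) (number : Int) : Decidable (Pre_solution N number) := by
  unfold Pre_solution; infer_instance

def pvWitness_solution : Int × Int := (5, 12)

def Spec_solution (N : Int) (number : Int) (out : Int) : Prop := out = solution_alt N number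
instance (N : Int) (number : Int) (out : Int) : Decidable (Spec_solution N number out) := by
  unfold Spec_solution; infer_instance

-- ===== CLAIM (what is proved, stated in full; the proofs are below) =====
def Claim_equal_solution : Prop := ∀ (N : Int) (number : Int), Dom_solution N number →
  Pre_solution N number → Spec_solution N number (solution N number)

-- ===== LEMMAS AND PROOFS =====

-- reach at level i ≥ 2 written with plain (non-attached) foldl over range' 1 (i-1)
theorem reachB_two_add (N : Int) (c : Nat) :
    reachB N (c + 2) =
      PySem.Set.diff
        ((List.range' 1 (c + 1)).foldl
          (fun s j => pvInner s (reachB N j) (reachB N (c + 2 - j)))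
          (PySem.Set.add PySem.Set.empty (repunitB N (c + 2))))
        (PySem.Set.add PySem.Set.empty 0) := by
  rw [reachB]
  simp

-- the set A builds at level i equals reach i, given dp holds reach below i
theorem level_eq_reach (N : Int) (i : Nat) (dp : List (PySem.Set Int)) (hi : 2 ≤ i)
    (hdp : ∀ j, 1 ≤ j → j < i → dp.getD j PySem.Set.empty = reachB N j) :
    PySem.Set.diff
      ((List.range' 1 (i - 1)).foldl
        (fun s j => pvInner s (dp.getD j PySem.Set.empty) (dp.getD (i - j) PySem.Set.empty))
        (PySem.Set.add PySem.Set.empty (repunitB N (i - 1) * 10 + N)))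
      (PySem.Set.add PySem.Set.empty 0) = reachB N i := by
  obtain ⟨c, rfl⟩ : ∃ c, i = c + 2 := ⟨i - 2, by omega⟩
  rw [reachB_two_add]
  have hrep : repunitB N (c + 2 - 1) * 10 + N = repunitB N (c + 2) := by
    simp [repunitB]
  have hfold : (List.range' 1 (c + 2 - 1)).foldl
      (fun s j => pvInner s (dp.getD j PySem.Set.empty) (dp.getD (c + 2 - j) PySem.Set.empty))
      (PySem.Set.add PySem.Set.empty (repunitB N (c + 2 - 1) * 10 + N)) =
      (List.range' 1 (c + 1)).foldl
      (fun s j => pvInner s (reachB N j) (reachB N (c + 2 - j)))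
      (PySem.Set.add PySem.Set.empty (repunitB N (c + 2))) := by
    rw [hrep]
    have hr : c + 2 - 1 = c + 1 := by omega
    rw [hr]
    apply PySem.List.foldl_congr_mem
    intro s j hj
    have hj' := List.mem_range'.mp hj
    have h1 : dp.getD j PySem.Set.empty = reachB N j := hdp j (by omega) (by omega)
    have h2 : dp.getD (c + 2 - j) PySem.Set.empty = reachB N (c + 2 - j) :=
      hdp (c + 2 - j) (by omega) (by omega)
    rw [h1, h2]
  rw [hfold]

-- the loop invariant: dp holds reach at all levels below i, tmp is repunit (i-1)
theorem solutionLoop_eq_firstCount (N number : Int) (i : Nat) (dp : List (PySem.Set Int))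
    (hi : 2 ≤ i) (hlen : dp.length = 9)
    (hdp : ∀ j, 1 ≤ j → j < i → dp.getD j PySem.Set.empty = reachB N j) :
    solutionLoop N number i dp (repunitB N (i - 1)) = firstCountB N number i := by
  rw [solutionLoop, firstCountB]
  by_cases h9 : 9 ≤ i
  · simp [h9]
  · simp only [h9, dif_neg, not_false_iff]
    have hset := level_eq_reach N i dp hi hdp
    rw [hset]
    by_cases hm : (reachB N i).contains number = true
    · rw [if_pos hm, if_pos hm]
    · rw [if_neg hm, if_neg hm]
      have hrep : repunitB N (i - 1) * 10 + N = repunitB N (i + 1 - 1) := by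
        obtain ⟨c, rfl⟩ : ∃ c, i = c + 2 := ⟨i - 2, by omega⟩
        simp [repunitB]
      rw [hrep]
      apply solutionLoop_eq_firstCount N number (i + 1) (dp.set i (reachB N i)) (by omega)
        (by simp [hlen])
      intro j h1 h2
      by_cases hji : j = i
      · subst hji
        simp [List.getD, hlen, Nat.lt_of_not_le h9]
      · have : j < i := by omega
        rw [← hdp j h1 this]
        simp [List.getD, List.getElem?_set_ne (by omega : i ≠ j)]
  termination_by 9 - i
  decreasing_by omega

theorem solution_eq (N number : Int) : solution N number = solution_alt N number := by
  unfold solution solution_alt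
  by_cases h : N = number
  · simp [h]
  · simp only [beq_iff_eq, h, if_false]
    have := solutionLoop_eq_firstCount N number 2
      ((List.replicate 9 (PySem.Set.empty : PySem.Set Int)).set 1 (PySem.Set.ofList [N]))
      (by omega) (by simp) ?_
    · simpa [repunitB] using this
    · intro j h1 h2
      have : j = 1 := by omega
      subst this
      simp [reachB, PySem.Set.ofList, PySem.Set.add, PySem.Set.empty, PySem.Set.contains,
        List.getD]

-- ===== VERDICT (by name: the statement is the Claim_ definition above) =====
theorem solution_spec : Claim_equal_solution := by
  intro N number _ _
  unfold Spec_solution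
  exact solution_eq N number
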